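-- pv_equiv track=rewrite | github.com/phluoroGG/tridiagonal-matrix-solving | main.py | uncompress_into_tridiagonal_matrix
-- ===== SOURCE A (Python) =====
-- def uncompress_into_tridiagonal_matrix(matrix_storage):
--     size = (len(matrix_storage) + 2) // 3
--     first_row = [matrix_storage[0], matrix_storage[1]]
--     for i in range(size - 2):
--         first_row.append(0)
--     last_row = [matrix_storage[len(matrix_storage) - 2], matrix_storage[len(matrix_storage) - 1]]
--     for i in range(size - 2):
--         last_row.insert(0, 0)
--     matrix = [first_row, last_row]
--     for i in range(1, size - 1):
--         row = []
--         for j in range(i - 1):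
--             row.append(0)
--         for j in range(3):
--             row.append(matrix_storage[j + 3 * i - 1])
--         for j in range(size - 2 - i):
--             row.append(0)
--         matrix.insert(len(matrix) - 1, row)
--     return matrix
-- ===== SOURCE B (Python) =====
-- def uncompress_into_tridiagonal_matrix(matrix_storage):
--     size = (len(matrix_storage) + 2) // 3
--     matrix = [[0] * size for _ in range(size)]
--     matrix[0][0] = matrix_storage[0]
--     matrix[0][1] = matrix_storage[1]
--     for i in range(1, size - 1):
--         matrix[i][i - 1] = matrix_storage[3 * i - 1]
--         matrix[i][i] = matrix_storage[3 * i]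
--         matrix[i][i + 1] = matrix_storage[3 * i + 1]
--     matrix[size - 1][size - 2] = matrix_storage[-2]
--     matrix[size - 1][size - 1] = matrix_storage[-1]
--     return matrix
-- ===== Notes on version B (the rewrite author's own statement) =====
-- stated objective: simpler
-- what changed: Replaces A's append/insert row construction (building each row by padding loops and inserting middle rows before the last row of the result list) with preallocating a size x size zero matrix and scattering the three band entries of each row by index assignment.
-- outside the precondition, e.g. on uncompress_into_tridiagonal_matrix([1, 2]): A returns [[1, 2], [1, 2]], B raises IndexError; on uncompress_into_tridiagonal_matrix([1, 2, 3]): A returns [[1, 2], [2, 3]], B raises IndexError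
import Mathlib
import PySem

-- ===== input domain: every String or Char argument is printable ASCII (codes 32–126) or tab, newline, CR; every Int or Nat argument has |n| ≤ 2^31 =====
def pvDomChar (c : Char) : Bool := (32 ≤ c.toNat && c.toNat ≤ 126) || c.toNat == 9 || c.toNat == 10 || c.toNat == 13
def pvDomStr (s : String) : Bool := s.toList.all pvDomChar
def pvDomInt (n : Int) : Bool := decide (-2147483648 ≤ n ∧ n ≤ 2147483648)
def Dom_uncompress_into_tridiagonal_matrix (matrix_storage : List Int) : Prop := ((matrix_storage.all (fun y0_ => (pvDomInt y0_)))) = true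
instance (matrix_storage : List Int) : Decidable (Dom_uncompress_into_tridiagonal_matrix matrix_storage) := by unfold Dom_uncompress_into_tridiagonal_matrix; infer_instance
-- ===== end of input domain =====

-- B replaces A's append/insert row construction by preallocating a size×size zero matrix
-- and scattering the band entries by index assignment (objective: simpler).

-- ===== PORT A =====
def uncompress_into_tridiagonal_matrix (matrix_storage : List Int) : List (List Int) :=
  let size : Nat := (matrix_storage.length + 2) / 3
  let first_row := (List.range (size - 2)).foldl (fun r _ => r ++ [(0:Int)])
      [PySem.List.pyGetD matrix_storage 0 0, PySem.List.pyGetD matrix_storage 1 0]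
  let last_row := (List.range (size - 2)).foldl (fun r _ => (0:Int) :: r)
      [PySem.List.pyGetD matrix_storage ((matrix_storage.length : Int) - 2) 0,
       PySem.List.pyGetD matrix_storage ((matrix_storage.length : Int) - 1) 0]
  let matrix := [first_row, last_row]
  -- for i in range(1, size - 1): build row, matrix.insert(len(matrix) - 1, row)
  (List.range' 1 (size - 2)).foldl (fun m i =>
      let row : List Int := (List.range (i - 1)).foldl (fun r _ => r ++ [(0:Int)]) []
      let row := (List.range 3).foldl
          (fun r (j : Nat) => r ++ [PySem.List.pyGetD matrix_storage ((j : Int) + 3 * (i : Int) - 1) 0]) row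
      let row := (List.range (size - 2 - i)).foldl (fun r _ => r ++ [(0:Int)]) row
      PySem.List.insert m ((m.length : Int) - 1) row) matrix

-- ===== PORT B =====
-- matrix[i][j] = v on a list-of-lists
def pvSetAt (m : List (List Int)) (i j : Nat) (v : Int) : List (List Int) :=
  m.set i ((m.getD i []).set j v)

def uncompress_into_tridiagonal_matrix_alt (matrix_storage : List Int) : List (List Int) :=
  let size : Nat := (matrix_storage.length + 2) / 3
  let m := List.replicate size (List.replicate size (0:Int))
  let m := pvSetAt m 0 0 (PySem.List.pyGetD matrix_storage 0 0)
  let m := pvSetAt m 0 1 (PySem.List.pyGetD matrix_storage 1 0)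
  let m := (List.range' 1 (size - 2)).foldl (fun m i =>
      let m := pvSetAt m i (i - 1) (PySem.List.pyGetD matrix_storage (3 * (i : Int) - 1) 0)
      let m := pvSetAt m i i (PySem.List.pyGetD matrix_storage (3 * (i : Int)) 0)
      pvSetAt m i (i + 1) (PySem.List.pyGetD matrix_storage (3 * (i : Int) + 1) 0)) m
  let m := pvSetAt m (size - 1) (size - 2) (PySem.List.pyGetD matrix_storage (-2) 0)
  pvSetAt m (size - 1) (size - 1) (PySem.List.pyGetD matrix_storage (-1) 0)

-- ===== PRECONDITION & SPEC =====
-- Pre_ excludes storages of length < 4: for lengths 0–1 A raises IndexError, and for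
-- lengths 2–3 (a degenerate "size = 1" storage) A returns an accidental duplicated-row
-- value while B's scatter naturally raises IndexError.
def Pre_uncompress_into_tridiagonal_matrix (matrix_storage : List Int) : Prop :=
  4 ≤ matrix_storage.length
instance (matrix_storage : List Int) : Decidable (Pre_uncompress_into_tridiagonal_matrix matrix_storage) := by
  unfold Pre_uncompress_into_tridiagonal_matrix; infer_instance
def pvWitness_uncompress_into_tridiagonal_matrix : List Int := [1, 2, 3, 4]

def Spec_uncompress_into_tridiagonal_matrix (matrix_storage : List Int) (out : List (List Int)) : Prop := out = uncompress_into_tridiagonal_matrix_alt matrix_storage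
instance (matrix_storage : List Int) (out : List (List Int)) : Decidable (Spec_uncompress_into_tridiagonal_matrix matrix_storage out) := by unfold Spec_uncompress_into_tridiagonal_matrix; infer_instance

-- ===== CLAIM (what is proved, stated in full; the proofs are below) =====
def Claim_equal_uncompress_into_tridiagonal_matrix : Prop := ∀ (matrix_storage : List Int), Dom_uncompress_into_tridiagonal_matrix matrix_storage → Pre_uncompress_into_tridiagonal_matrix matrix_storage → Spec_uncompress_into_tridiagonal_matrix matrix_storage (uncompress_into_tridiagonal_matrix matrix_storage)

-- ===== LEMMAS AND PROOFS =====

-- append-0 loop = replicate padding on the right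
lemma pv_foldl_append_zero (k : Nat) (init : List Int) :
    (List.range k).foldl (fun r _ => r ++ [(0:Int)]) init = init ++ List.replicate k 0 := by
  induction k generalizing init with
  | zero => simp
  | succ k ih =>
    rw [List.range_succ, List.foldl_append]
    simp [ih, List.replicate_succ' (n := k)]

-- insert-0-at-front loop = replicate padding on the left
lemma pv_foldl_cons_zero (k : Nat) (init : List Int) :
    (List.range k).foldl (fun r _ => (0:Int) :: r) init = List.replicate k 0 ++ init := by
  induction k generalizing init with
  | zero => simp
  | succ k ih =>
    rw [List.range_succ, List.foldl_append]
    simp only [List.foldl_cons, List.foldl_nil, ih, List.replicate_succ, List.cons_append]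

-- Python's matrix.insert(len(matrix)-1, row) on a nonempty list
lemma pv_insert_last (pre : List (List Int)) (l row : List Int) :
    PySem.List.insert (pre ++ [l]) (((pre ++ [l]).length : Int) - 1) row = pre ++ [row, l] := by
  have h1 : (((pre ++ [l]).length : Int) - 1) = ((pre.length : Nat) : Int) := by
    simp
  rw [h1, PySem.List.insert_natCast _ _ _ (by simp)]
  simp

-- A's outer loop: inserting rows just before the last element
lemma pv_loopA (row : Nat → List Int) :
    ∀ (k lo : Nat) (pre : List (List Int)) (l : List Int),
    (List.range' lo k).foldl (fun m i => PySem.List.insert m ((m.length : Int) - 1) (row i)) (pre ++ [l])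
      = pre ++ (List.range' lo k).map row ++ [l] := by
  intro k
  induction k with
  | zero => intro lo pre l; simp
  | succ k ih =>
    intro lo pre l
    rw [List.range'_succ]
    simp only [List.foldl_cons, pv_insert_last]
    have := ih (lo + 1) (pre ++ [row lo]) l
    simp only [List.append_assoc] at this ⊢
    simpa [List.map_cons] using this

-- setting one cell of an all-zero row
lemma pv_set_replicate (j k : Nat) (v : Int) (h : j < k) :
    (List.replicate k (0:Int)).set j v = List.replicate j 0 ++ v :: List.replicate (k - j - 1) 0 := by
  induction j generalizing k with
  | zero =>
    obtain ⟨k', rfl⟩ : ∃ k', k = k' + 1 := ⟨k - 1, by omega⟩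
    simp [List.replicate_succ]
  | succ j ih =>
    obtain ⟨k', rfl⟩ : ∃ k', k = k' + 1 := ⟨k - 1, by omega⟩
    simp [List.replicate_succ, ih k' (by omega)]

lemma pv_first_row_set (size : Nat) (h : 2 ≤ size) (a b : Int) :
    ((List.replicate size (0:Int)).set 0 a).set 1 b = a :: b :: List.replicate (size - 2) 0 := by
  obtain ⟨s', rfl⟩ : ∃ s', size = s' + 2 := ⟨size - 2, by omega⟩
  simp [List.replicate_succ]

lemma pv_last_row_set (size : Nat) (h : 2 ≤ size) (a b : Int) :
    ((List.replicate size (0:Int)).set (size - 2) a).set (size - 1) b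
      = List.replicate (size - 2) (0:Int) ++ [a, b] := by
  rw [pv_set_replicate (size - 2) size a (by omega)]
  have hs : size - (size - 2) - 1 = 1 := by omega
  rw [hs]
  rw [List.set_append_right _ _ (by simp only [List.length_replicate]; omega)]
  have hi : size - 1 - (List.replicate (size - 2) (0:Int)).length = 1 := by
    simp only [List.length_replicate]; omega
  rw [hi]
  simp

lemma pv_mid_row_set (size i : Nat) (h1 : 1 ≤ i) (h2 : i + 1 < size) (a b c : Int) :
    (((List.replicate size (0:Int)).set (i - 1) a).set i b).set (i + 1) c
      = List.replicate (i - 1) 0 ++ a :: b :: c :: List.replicate (size - 2 - i) 0 := by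
  rw [pv_set_replicate (i - 1) size a (by omega)]
  rw [List.set_append_right _ _ (by simp only [List.length_replicate]; omega)]
  have hi : i - (List.replicate (i - 1) (0:Int)).length = 1 := by
    simp only [List.length_replicate]; omega
  rw [hi]
  have hs : size - (i - 1) - 1 = size - i := by omega
  rw [hs]
  have hsi : ∃ t, size - i = t + 2 := ⟨size - i - 2, by omega⟩
  obtain ⟨t, ht⟩ := hsi
  rw [ht]
  rw [List.set_append_right _ _ (by simp only [List.length_replicate]; omega)]
  have hj : i + 1 - (List.replicate (i - 1) (0:Int)).length = 2 := by
    simp only [List.length_replicate]; omega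
  rw [hj]
  have hts : size - 2 - i = t := by omega
  simp [List.replicate_succ, hts]

-- updating the first row of the replicate part sitting after a prefix
lemma pv_setAt_append (pre : List (List Int)) (r : List Int) (rest : List (List Int))
    (j : Nat) (v : Int) :
    pvSetAt (pre ++ r :: rest) pre.length j v = pre ++ (r.set j v) :: rest := by
  unfold pvSetAt
  have hget : (pre ++ r :: rest).getD pre.length [] = r := by
    simp [List.getD]
  rw [hget, List.set_append_right _ _ (Nat.le_refl _)]
  simp

lemma pv_setAt_cons (r : List Int) (rest : List (List Int)) (j : Nat) (v : Int) :
    pvSetAt (r :: rest) 0 j v = (r.set j v) :: rest := by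
  simp [pvSetAt]

-- B's middle loop: each iteration rewrites exactly the next all-zero row
lemma pv_loopB (z : List Int) (a b c : Nat → Int) (N : Nat) :
    ∀ (k lo : Nat) (pre : List (List Int)), pre.length = lo → lo + k ≤ N →
    (List.range' lo k).foldl
        (fun m i => pvSetAt (pvSetAt (pvSetAt m i (i - 1) (a i)) i i (b i)) i (i + 1) (c i))
        (pre ++ List.replicate (N - lo) z)
      = (pre ++ (List.range' lo k).map
          (fun i => ((z.set (i - 1) (a i)).set i (b i)).set (i + 1) (c i)))
        ++ List.replicate (N - lo - k) z := by
  intro k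
  induction k with
  | zero => intro lo pre hl hb; simp
  | succ k ih =>
    intro lo pre hl hb
    subst hl
    rw [List.range'_succ]
    simp only [List.foldl_cons, List.map_cons]
    have h' : N - pre.length = (N - pre.length - 1) + 1 := by omega
    conv_lhs => rw [h', List.replicate_succ]
    rw [pv_setAt_append, pv_setAt_append, pv_setAt_append]
    have hsplit : pre ++ (((z.set (pre.length - 1) (a pre.length)).set pre.length
            (b pre.length)).set (pre.length + 1) (c pre.length)) ::
          List.replicate (N - pre.length - 1) z
        = (pre ++ [((z.set (pre.length - 1) (a pre.length)).set pre.length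
            (b pre.length)).set (pre.length + 1) (c pre.length)])
          ++ List.replicate (N - (pre.length + 1)) z := by
      rw [show N - pre.length - 1 = N - (pre.length + 1) from by omega]
      simp
    rw [hsplit, ih (pre.length + 1) _ (by simp) (by omega)]
    rw [show N - (pre.length + 1) - k = N - pre.length - (k + 1) from by omega]
    simp [List.append_assoc]

-- A's index matrix_storage[len-2] / [len-1] equals B's matrix_storage[-2] / [-1]
lemma pv_neg_idx (s : List Int) (k : Nat) (h1 : 0 < k) (h2 : k ≤ s.length) :
    PySem.List.pyGetD s (-(k : Int)) 0 = PySem.List.pyGetD s ((s.length : Int) - k) 0 := by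
  rw [PySem.List.pyGetD_neg_natCast _ _ _ h1 h2]
  rw [PySem.List.pyGetD_eq_getElem _ _ (by omega) (by omega)]
  congr 1
  omega

-- ===== VERDICT (by name: the statement is the Claim_ definition above) =====
theorem uncompress_into_tridiagonal_matrix_spec : Claim_equal_uncompress_into_tridiagonal_matrix := by
  intro s _ hpre
  unfold Pre_uncompress_into_tridiagonal_matrix at hpre
  unfold Spec_uncompress_into_tridiagonal_matrix
  unfold uncompress_into_tridiagonal_matrix uncompress_into_tridiagonal_matrix_alt
  simp only []
  set n := s.length with hn
  set size := (n + 2) / 3 with hsize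
  have hsz2 : 2 ≤ size := by omega
  rw [pv_foldl_append_zero, pv_foldl_cons_zero]
  -- A side: outer insert loop
  rw [show [[PySem.List.pyGetD s 0 0, PySem.List.pyGetD s 1 0] ++ List.replicate (size - 2) 0, List.replicate (size - 2) 0 ++ [PySem.List.pyGetD s ((n : Int) - 2) 0, PySem.List.pyGetD s ((n : Int) - 1) 0]] = [[PySem.List.pyGetD s 0 0, PySem.List.pyGetD s 1 0] ++ List.replicate (size - 2) 0] ++ [List.replicate (size - 2) 0 ++ [PySem.List.pyGetD s ((n : Int) - 2) 0, PySem.List.pyGetD s ((n : Int) - 1) 0]] from rfl]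
  have hA := pv_loopA (fun i => (List.range (size - 2 - i)).foldl (fun r _ => r ++ [(0:Int)]) ((List.range 3).foldl (fun r (j : Nat) => r ++ [PySem.List.pyGetD s ((j : Int) + 3 * (i : Int) - 1) 0]) ((List.range (i - 1)).foldl (fun r _ => r ++ [(0:Int)]) []))) (size - 2) 1 [[PySem.List.pyGetD s 0 0, PySem.List.pyGetD s 1 0] ++ List.replicate (size - 2) 0] (List.replicate (size - 2) 0 ++ [PySem.List.pyGetD s ((n : Int) - 2) 0, PySem.List.pyGetD s ((n : Int) - 1) 0])
  beta_reduce at hA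
  rw [hA]
  -- B side: initial zero matrix and the two first-row assignments
  have hms : List.replicate size (List.replicate size (0:Int))
      = (List.replicate size (0:Int)) :: List.replicate (size - 1) (List.replicate size (0:Int)) := by
    rw [← List.replicate_succ]
    congr 1
    omega
  rw [hms, pv_setAt_cons, pv_setAt_cons]
  -- B side: the middle scatter loop
  rw [show (((List.replicate size (0:Int)).set 0 (PySem.List.pyGetD s 0 0)).set 1 (PySem.List.pyGetD s 1 0)) :: List.replicate (size - 1) (List.replicate size (0:Int))
      = [((List.replicate size (0:Int)).set 0 (PySem.List.pyGetD s 0 0)).set 1 (PySem.List.pyGetD s 1 0)] ++ List.replicate (size - 1) (List.replicate size (0:Int)) from rfl]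
  have hB := pv_loopB (List.replicate size (0:Int)) (fun i => PySem.List.pyGetD s (3 * (i : Int) - 1) 0) (fun i => PySem.List.pyGetD s (3 * (i : Int)) 0) (fun i => PySem.List.pyGetD s (3 * (i : Int) + 1) 0) size (size - 2) 1
      [((List.replicate size (0:Int)).set 0 (PySem.List.pyGetD s 0 0)).set 1 (PySem.List.pyGetD s 1 0)] (by simp) (by omega)
  beta_reduce at hB
  rw [hB]
  -- B side: the two last-row assignments hit the final all-zero row
  rw [show size - 1 - (size - 2) = 1 from by omega, List.replicate_one]
  have hPlen : ([((List.replicate size (0:Int)).set 0 (PySem.List.pyGetD s 0 0)).set 1 (PySem.List.pyGetD s 1 0)] ++ List.map (fun i => (((List.replicate size (0:Int)).set (i - 1) (PySem.List.pyGetD s (3 * (i : Int) - 1) 0)).set i (PySem.List.pyGetD s (3 * (i : Int)) 0)).set (i + 1) (PySem.List.pyGetD s (3 * (i : Int) + 1) 0)) (List.range' 1 (size - 2))).length = size - 1 := by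
    simp
    omega
  rw [← hPlen]
  rw [pv_setAt_append, pv_setAt_append]
  rw [hPlen]
  -- rows agree
  rw [pv_first_row_set size hsz2, pv_last_row_set size hsz2]
  have hneg2 : PySem.List.pyGetD s (-2) 0 = PySem.List.pyGetD s ((n : Int) - 2) 0 := by
    have := pv_neg_idx s 2 (by omega) (by omega)
    norm_num at this
    exact this
  have hneg1 : PySem.List.pyGetD s (-1) 0 = PySem.List.pyGetD s ((n : Int) - 1) 0 := by
    have := pv_neg_idx s 1 (by omega) (by omega)
    norm_num at this
    exact this
  rw [hneg2, hneg1]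
  simp only [List.cons_append, List.nil_append]
  congr 2
  apply List.map_congr_left
  intro i hi
  rw [List.mem_range'_1] at hi
  rw [pv_foldl_append_zero, pv_foldl_append_zero]
  rw [pv_mid_row_set size i (by omega) (by omega)]
  simp [List.range_succ, List.append_assoc]
  ring_nf
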